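-- pv_equiv track=rewrite | github.com/MrBrantCode/unitest_baseline | mut_generate/mist_train_taco/taco_5072/solution.py | rope_cutting
-- ===== SOURCE A (Python) =====
-- def rope_cutting(arr, n):
--     if n == 0:
--         return [0]
--
--     ropes = sorted(arr)
--     result = []
--     cutting_length = ropes[0]
--
--     for i in range(1, n):
--         if ropes[i] - cutting_length > 0:
--             result.append(n - i)
--             cutting_length = ropes[i]
--
--     if not result:
--         return [0]
--
--     return result
-- ===== SOURCE B (Python) =====
-- def _first_ge(t, v):
--     lo, hi = 0, len(t)
--     while lo < hi:
--         mid = (lo + hi) // 2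
--         if t[mid] < v:
--             lo = mid + 1
--         else:
--             hi = mid
--     return lo
--
-- def rope_cutting(arr, n):
--     if n <= 0:
--         return [0]
--     t = sorted(arr)[:n]
--     distinct = list(dict.fromkeys(t))
--     res = [len(t) - _first_ge(t, v) for v in distinct[1:]]
--     return res if res else [0]
-- ===== Notes on version B (the rewrite author's own statement) =====
-- stated objective: alternative
-- what changed: B drops A's single scan over the sorted array with cutting_length/result registers: it dedups the n smallest lengths and answers each distinct non-minimal length v by an independent binary-search query (first index with value >= v) on the sorted prefix, so there is no running accumulator and no boundary detection.
import Mathlib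
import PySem

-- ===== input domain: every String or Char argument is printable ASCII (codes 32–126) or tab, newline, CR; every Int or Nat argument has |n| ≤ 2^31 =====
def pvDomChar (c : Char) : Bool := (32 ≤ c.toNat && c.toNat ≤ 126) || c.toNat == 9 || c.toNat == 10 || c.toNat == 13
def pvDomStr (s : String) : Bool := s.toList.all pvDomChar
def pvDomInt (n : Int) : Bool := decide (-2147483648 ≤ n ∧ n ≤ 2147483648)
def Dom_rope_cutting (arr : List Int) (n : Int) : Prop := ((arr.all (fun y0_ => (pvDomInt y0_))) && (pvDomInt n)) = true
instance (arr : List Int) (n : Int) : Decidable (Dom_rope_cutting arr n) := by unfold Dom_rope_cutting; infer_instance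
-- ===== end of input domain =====

-- B answers each distinct non-minimal length v by directly counting the elements ≥ v among the n smallest (per-value counting queries), instead of A's sorted scan with cutting_length/result registers; same return value on Pre_.

-- ===== PORT A =====
def rope_cutting (arr : List Int) (n : Int) : List Int :=
  if n = 0 then [0]
  else
    let ropes := PySem.List.sorted arr (fun x => x) false
    let cutting := PySem.List.pyGetD ropes 0 0
    let st := (PySem.List.pyRange 1 n 1).foldl
      (fun (st : List Int × Int) i =>
        if PySem.List.pyGetD ropes i 0 - st.2 > 0 then
          (st.1 ++ [n - i], PySem.List.pyGetD ropes i 0)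
        else st) ([], cutting)
    if st.1 = [] then [0] else st.1

-- ===== PORT B =====
-- binary search: first index in [lo, hi) of the sorted list t holding a value ≥ v (the while loop of _first_ge)
def pvFirstGe (t : List Int) (v : Int) (lo hi : Int) : Int :=
  if lo < hi then
    let mid := PySem.Int.floordiv (lo + hi) 2
    if PySem.List.pyGetD t mid 0 < v then pvFirstGe t v (mid + 1) hi
    else pvFirstGe t v lo mid
  else lo
termination_by (hi - lo).toNat
decreasing_by
  · rename_i h _
    have : lo ≤ PySem.Int.floordiv (lo + hi) 2 ∧ PySem.Int.floordiv (lo + hi) 2 < hi := by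
      unfold PySem.Int.floordiv
      rw [Int.fdiv_eq_ediv_of_nonneg _ (by norm_num)]
      omega
    omega
  · rename_i h _
    have : lo ≤ PySem.Int.floordiv (lo + hi) 2 ∧ PySem.Int.floordiv (lo + hi) 2 < hi := by
      unfold PySem.Int.floordiv
      rw [Int.fdiv_eq_ediv_of_nonneg _ (by norm_num)]
      omega
    omega

def rope_cutting_alt (arr : List Int) (n : Int) : List Int :=
  if n ≤ 0 then [0]
  else
    let t := PySem.List.slice (PySem.List.sorted arr (fun x => x) false) none (some n)
    let distinct := PySem.List.dedup t
    let res := (PySem.List.slice distinct (some 1) none).map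
      (fun v => ((t.length : Int) - pvFirstGe t v 0 (t.length : Int)))
    if res = [] then [0] else res

-- ===== PRECONDITION & SPEC =====
-- Pre_ excludes exactly the inputs where A raises IndexError: n ≠ 0 with arr empty (ropes[0]) or n > len(arr) (ropes[i]).
def Pre_rope_cutting (arr : List Int) (n : Int) : Prop :=
  n = 0 ∨ (arr ≠ [] ∧ n ≤ (arr.length : Int))
instance (arr : List Int) (n : Int) : Decidable (Pre_rope_cutting arr n) := by
  unfold Pre_rope_cutting; infer_instance
def pvWitness_rope_cutting : List Int × Int := ([3, 1, 2, 2], 4)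

def Spec_rope_cutting (arr : List Int) (n : Int) (out : List Int) : Prop := out = rope_cutting_alt arr n
instance (arr : List Int) (n : Int) (out : List Int) : Decidable (Spec_rope_cutting arr n out) := by unfold Spec_rope_cutting; infer_instance

-- ===== CLAIM (what is proved, stated in full; the proofs are below) =====
def Claim_equal_rope_cutting : Prop := ∀ (arr : List Int) (n : Int), Dom_rope_cutting arr n → Pre_rope_cutting arr n → Spec_rope_cutting arr n (rope_cutting arr n)

-- ===== LEMMAS AND PROOFS =====

-- boundary list produced by A's loop: state (cut, i) over the remaining elements
def pvBnds (n : Int) : Int → Int → List Int → List Int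
  | _cut, _i, [] => []
  | cut, i, x :: xs => if cut < x then (n - i) :: pvBnds n x (i + 1) xs else pvBnds n cut (i + 1) xs

def pvLastCut : Int → List Int → Int
  | cut, [] => cut
  | cut, x :: xs => pvLastCut (if cut < x then x else cut) xs

-- run-length encoding of a list
def pvRunsAux (v : Int) (c : Nat) : List Int → List (Int × Nat)
  | [] => [(v, c)]
  | x :: xs => if x = v then pvRunsAux v (c + 1) xs else (v, c) :: pvRunsAux x 1 xs

def pvExpand : List (Int × Nat) → List Int
  | [] => []
  | (v, c) :: gs => List.replicate c v ++ pvExpand gs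

-- what both computations produce: one entry n - i per group boundary, i = ropes already passed
def pvEntries (n : Int) : Int → List (Int × Nat) → List Int
  | _i, [] => []
  | i, (v, c) :: gs => (n - i) :: pvEntries n (i + (c : Int)) gs

theorem pvExpand_runsAux (v : Int) (c : Nat) (u : List Int) :
    pvExpand (pvRunsAux v c u) = List.replicate c v ++ u := by
  induction u generalizing v c with
  | nil => simp [pvRunsAux, pvExpand]
  | cons x xs ih =>
    by_cases h : x = v
    · subst h
      rw [pvRunsAux, if_pos rfl, ih, List.replicate_succ', List.append_assoc]
      simp
    · simp [pvRunsAux, h, pvExpand, ih]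

theorem pvRunsAux_head (v : Int) (c : Nat) (u : List Int) :
    ∃ c' gs', c ≤ c' ∧ pvRunsAux v c u = (v, c') :: gs' := by
  induction u generalizing c with
  | nil => exact ⟨c, [], le_rfl, rfl⟩
  | cons x xs ih =>
    by_cases h : x = v
    · obtain ⟨c', gs', hc, he⟩ := ih (c + 1)
      exact ⟨c', gs', by omega, by rw [pvRunsAux, if_pos h]; exact he⟩
    · exact ⟨c, pvRunsAux x 1 xs, le_rfl, by rw [pvRunsAux, if_neg h]⟩

theorem pvRunsAux_pos (v : Int) (c : Nat) (u : List Int) (hc : 0 < c) :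
    ∀ p ∈ pvRunsAux v c u, 0 < p.2 := by
  induction u generalizing v c with
  | nil => simpa [pvRunsAux] using hc
  | cons x xs ih =>
    by_cases h : x = v
    · simpa [pvRunsAux, h] using ih v (c + 1) (by omega)
    · intro p hp
      simp [pvRunsAux, h] at hp
      rcases hp with hp | hp
      · rw [hp]
        exact hc
      · exact ih x 1 (by omega) p hp

theorem pvMem_fst_runsAux (v : Int) (c : Nat) (u : List Int) (w : Int) :
    w ∈ (pvRunsAux v c u).map Prod.fst ↔ w = v ∨ w ∈ u := by
  induction u generalizing v c with
  | nil => simp [pvRunsAux]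
  | cons x xs ih =>
    by_cases h : x = v
    · rw [pvRunsAux, if_pos h, ih]
      subst h
      simp
    · rw [pvRunsAux, if_neg h]
      simp [ih]

theorem pvPairwise_fst_runsAux (v : Int) (c : Nat) (u : List Int)
    (hu : u.Pairwise (· ≤ ·)) (hv : ∀ y ∈ u, v ≤ y) :
    ((pvRunsAux v c u).map Prod.fst).Pairwise (· < ·) := by
  induction u generalizing v c with
  | nil => simp [pvRunsAux]
  | cons x xs ih =>
    rw [List.pairwise_cons] at hu
    by_cases h : x = v
    · simp only [pvRunsAux, if_pos h]
      exact ih v (c + 1) hu.2 (fun y hy => h ▸ hu.1 y hy)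
    · have hvx : v < x := lt_of_le_of_ne (hv x (by simp)) (fun e => h e.symm)
      simp only [pvRunsAux, if_neg h, List.map_cons, List.pairwise_cons]
      refine ⟨?_, ih x 1 hu.2 hu.1⟩
      intro w hw
      rcases (pvMem_fst_runsAux x 1 xs w).1 hw with rfl | hw
      · exact hvx
      · exact lt_of_lt_of_le hvx (hu.1 w hw)

theorem pvMem_expand (gs : List (Int × Nat)) (x : Int) (hx : x ∈ pvExpand gs) :
    x ∈ gs.map Prod.fst := by
  induction gs with
  | nil => simpa [pvExpand] using hx
  | cons p gs ih =>
    obtain ⟨v, c⟩ := p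
    rw [pvExpand, List.mem_append] at hx
    rcases hx with hx | hx
    · simp [List.eq_of_mem_replicate hx]
    · exact List.mem_cons_of_mem _ (ih hx)

theorem pvBnds_replicate (n v i : Int) (c : Nat) (ys : List Int) :
    pvBnds n v i (List.replicate c v ++ ys) = pvBnds n v (i + (c : Int)) ys := by
  induction c generalizing i with
  | zero => simp
  | succ c ih =>
    simp only [List.replicate_succ, List.cons_append, pvBnds, lt_irrefl, if_neg (lt_irrefl v)]
    rw [ih, show i + (((c + 1 : Nat)) : Int) = (i + 1) + (c : Int) by push_cast; ring]
    simp

theorem pvBnds_expand (n : Int) (gs : List (Int × Nat)) :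
    ∀ (cut i : Int), (∀ p ∈ gs, 0 < p.2) →
      List.IsChain (· < ·) (cut :: gs.map Prod.fst) →
      pvBnds n cut i (pvExpand gs) = pvEntries n i gs := by
  induction gs with
  | nil => intro cut i _ _; simp [pvExpand, pvBnds, pvEntries]
  | cons q gs ih =>
    obtain ⟨v, c⟩ := q
    intro cut i hpos hch
    rw [List.map_cons, List.isChain_cons_cons] at hch
    have hc : 0 < c := hpos (v, c) (List.mem_cons_self ..)
    obtain ⟨c', rfl⟩ : ∃ c', c = c' + 1 := ⟨c - 1, by omega⟩
    simp only [pvExpand, List.replicate_succ, List.cons_append, pvBnds, if_pos hch.1]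
    rw [pvBnds_replicate, ih v (i + 1 + (c' : Int))
      (fun p hp => hpos p (List.mem_cons_of_mem _ hp)) hch.2]
    simp only [pvEntries]
    congr 2 <;> (push_cast; ring)

-- A's loop over range(i, i + |u|) reading s[j] equals the pvBnds recursion over u
theorem pvFoldA (s : List Int) (n : Int) (u : List Int) :
    ∀ (b i : Int) (res : List Int) (cut : Int), b = i + (u.length : Int) → 0 ≤ i →
    (∀ k : Nat, (hk : k < u.length) → PySem.List.pyGetD s (i + (k : Int)) 0 = u[k]) →
    (PySem.List.pyRange i b 1).foldl
      (fun (st : List Int × Int) j =>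
        if PySem.List.pyGetD s j 0 - st.2 > 0 then
          (st.1 ++ [n - j], PySem.List.pyGetD s j 0)
        else st) (res, cut)
    = (res ++ pvBnds n cut i u, pvLastCut cut u) := by
  induction u with
  | nil =>
    intro b i res cut hb _ _
    rw [PySem.List.pyRange_one_eq_nil (by simp at hb; omega)]
    simp [pvBnds, pvLastCut]
  | cons x xs ih =>
    intro b i res cut hb hi hget
    have hx : PySem.List.pyGetD s (i + ((0 : Nat) : Int)) 0 = x := hget 0 (by simp)
    simp only [Int.natCast_zero, add_zero] at hx
    have hb' : b = (i + 1) + (xs.length : Int) := by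
      rw [hb]; simp [List.length_cons]; push_cast; ring
    rw [PySem.List.pyRange_one_cons
      (by have := Int.natCast_nonneg xs.length; omega)]
    simp only [List.foldl_cons, hx]
    have hget' : ∀ k : Nat, (hk : k < xs.length) →
        PySem.List.pyGetD s ((i + 1) + (k : Int)) 0 = xs[k] := by
      intro k hk
      have := hget (k + 1) (by simpa using Nat.succ_lt_succ hk)
      simpa [add_assoc, add_comm, add_left_comm] using this
    by_cases h : cut < x
    · rw [if_pos (by omega)]
      rw [ih b (i + 1) (res ++ [n - i]) x hb' (by omega) hget']
      simp [pvBnds, pvLastCut, h]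
    · rw [if_neg (by omega)]
      rw [ih b (i + 1) res cut hb' (by omega) hget']
      simp [pvBnds, pvLastCut, h]

-- B side: dedup of an expanded run list is the list of group values
theorem pvFoldAdd_mem (v : Int) (c : Nat) (acc : PySem.Set Int) (hv : v ∈ acc) :
    List.foldl PySem.Set.add acc (List.replicate c v) = acc := by
  induction c with
  | zero => rfl
  | succ c ih =>
    rw [List.replicate_succ, List.foldl_cons,
      show PySem.Set.add acc v = acc from by
        simp [PySem.Set.add, PySem.Set.contains, hv]]
    exact ih

theorem pvOfList_expand (gs : List (Int × Nat))
    (hpos : ∀ p ∈ gs, 0 < p.2) (hpw : (gs.map Prod.fst).Pairwise (· < ·)) :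
    PySem.Set.ofList (pvExpand gs) = gs.map Prod.fst := by
  induction gs with
  | nil => rfl
  | cons q gs ih =>
    obtain ⟨v, c⟩ := q
    rw [List.map_cons, List.pairwise_cons] at hpw
    have hc : 0 < c := hpos (v, c) (List.mem_cons_self ..)
    obtain ⟨c', rfl⟩ : ∃ c', c = c' + 1 := ⟨c - 1, by omega⟩
    rw [PySem.Set.ofList_eq_foldl, pvExpand, List.replicate_succ, List.cons_append,
      List.foldl_cons, List.foldl_append,
      show PySem.Set.add [] v = [v] from rfl,
      pvFoldAdd_mem v c' [v] (by simp),
      show List.foldl PySem.Set.add [v] (pvExpand gs) = PySem.Set.update [v] (pvExpand gs)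
        from rfl,
      PySem.Set.update_eq_append_filter,
      ih (fun p hp => hpos p (List.mem_cons_of_mem _ hp)) hpw.2]
    have : ∀ w ∈ gs.map Prod.fst, (!PySem.Set.contains [v] w) = true := by
      intro w hw
      have : v < w := hpw.1 w hw
      simp [PySem.Set.contains]
      omega
    rw [List.filter_eq_self.2 this]
    rfl

-- the binary search returns the first index with value ≥ v
theorem pvFirstGe_spec (t : List Int) (v : Int) (hs : t.Pairwise (· ≤ ·)) :
    ∀ (m : Nat) (lo hi : Int), (hi - lo).toNat = m → 0 ≤ lo → lo ≤ hi → hi ≤ (t.length : Int) →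
    (∀ k : Nat, (hk : k < t.length) → (k : Int) < lo → t[k] < v) →
    (∀ k : Nat, (hk : k < t.length) → hi ≤ (k : Int) → v ≤ t[k]) →
    lo ≤ pvFirstGe t v lo hi ∧ pvFirstGe t v lo hi ≤ hi ∧
    (∀ k : Nat, (hk : k < t.length) → (k : Int) < pvFirstGe t v lo hi → t[k] < v) ∧
    (∀ k : Nat, (hk : k < t.length) → pvFirstGe t v lo hi ≤ (k : Int) → v ≤ t[k]) := by
  intro m
  induction m using Nat.strong_induction_on with
  | _ m ih =>
    intro lo hi hm h0 hlh hhi hlow hhigh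
    rw [pvFirstGe]
    by_cases h : lo < hi
    · rw [if_pos h]
      have hmid : lo ≤ PySem.Int.floordiv (lo + hi) 2 ∧ PySem.Int.floordiv (lo + hi) 2 < hi := by
        unfold PySem.Int.floordiv
        rw [Int.fdiv_eq_ediv_of_nonneg _ (by norm_num)]
        omega
      set mid := PySem.Int.floordiv (lo + hi) 2 with hmd
      have hmn : mid = ((mid.toNat : Nat) : Int) := by omega
      have hmlt : mid.toNat < t.length := by omega
      have hgetd : PySem.List.pyGetD t mid 0 = t[mid.toNat] := by
        conv_lhs => rw [hmn]
        rw [PySem.List.pyGetD_natCast, List.getD_eq_getElem t 0 hmlt]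
      have hpwg := List.pairwise_iff_getElem.1 hs
      by_cases hc : PySem.List.pyGetD t mid 0 < v
      · rw [if_pos hc]
        rw [hgetd] at hc
        obtain ⟨a1, a2, a3, a4⟩ := ih (hi - (mid + 1)).toNat (by omega) (mid + 1) hi rfl (by omega) (by omega) hhi
          (by
            intro k hk hklt
            rcases lt_or_ge (k : Int) lo with h' | h'
            · exact hlow k hk h'
            · rcases Nat.lt_or_ge k mid.toNat with h2 | h2
              · exact lt_of_le_of_lt (hpwg k mid.toNat hk hmlt h2) hc
              · have hkm : k = mid.toNat := by omega
                subst hkm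
                exact hc)
          hhigh
        exact ⟨by omega, a2, a3, a4⟩
      · rw [if_neg hc]
        rw [hgetd] at hc
        obtain ⟨a1, a2, a3, a4⟩ := ih (mid - lo).toNat (by omega) lo mid rfl h0 (by omega) (by omega) hlow
          (by
            intro k hk hkge
            rcases Nat.lt_or_ge mid.toNat k with h2 | h2
            · exact le_trans (not_lt.1 hc) (hpwg mid.toNat k hmlt hk h2)
            · have hkm : k = mid.toNat := by omega
              subst hkm
              exact not_lt.1 hc)
        exact ⟨a1, by omega, a3, a4⟩
    · rw [if_neg h]
      refine ⟨le_refl _, by omega, hlow, ?_⟩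
      intro k hk hkge
      exact hhigh k hk (by omega)

-- hence len(t) - _first_ge(t, v) is the count of elements ≥ v
theorem pvCountP_eq_firstGe (t : List Int) (v : Int) (hs : t.Pairwise (· ≤ ·)) :
    (t.length : Int) - pvFirstGe t v 0 (t.length : Int)
      = ((t.countP (fun x => decide (v ≤ x))) : Int) := by
  obtain ⟨h0, h1, h2, h3⟩ := pvFirstGe_spec t v hs ((t.length : Int) - 0).toNat 0 (t.length : Int)
    rfl (le_refl 0) (by omega) (le_refl _)
    (by intro k _ hk; omega)
    (by intro k hk hge; omega)
  set r := pvFirstGe t v 0 (t.length : Int) with hr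
  have hsplit : t = t.take r.toNat ++ t.drop r.toNat := (List.take_append_drop ..).symm
  have hcnt : t.countP (fun x => decide (v ≤ x))
      = (t.take r.toNat).countP (fun x => decide (v ≤ x))
        + (t.drop r.toNat).countP (fun x => decide (v ≤ x)) := by
    conv_lhs => rw [hsplit]
    exact List.countP_append ..
  have htake : (t.take r.toNat).countP (fun x => decide (v ≤ x)) = 0 := by
    rw [List.countP_eq_zero]
    intro x hx
    obtain ⟨i, hi, hix⟩ := List.mem_iff_getElem.1 hx
    have hi' : i < t.length := lt_of_lt_of_le hi (by simp [List.length_take])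
    have hir : i < r.toNat := by
      have := hi
      simp [List.length_take] at this
      omega
    rw [← hix, List.getElem_take]
    have := h2 i hi' (by omega)
    simp
    omega
  have hdrop : (t.drop r.toNat).countP (fun x => decide (v ≤ x)) = (t.drop r.toNat).length := by
    rw [List.countP_eq_length]
    intro x hx
    obtain ⟨i, hi, hix⟩ := List.mem_iff_getElem.1 hx
    have hi' : r.toNat + i < t.length := by
      have := hi
      simp [List.length_drop] at this
      omega
    rw [← hix, List.getElem_drop]
    have := h3 (r.toNat + i) hi' (by omega)
    simp
    omega
  rw [hcnt, htake, hdrop, Nat.zero_add, List.length_drop]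
  omega

-- B's per-value counting queries produce exactly the boundary entries
theorem pvMapGe (t : List Int) (n : Int) (hn : (t.length : Int) = n) :
    ∀ (gs : List (Int × Nat)) (pre : List Int), t = pre ++ pvExpand gs →
    (∀ p ∈ gs, 0 < p.2) → ((gs.map Prod.fst).Pairwise (· < ·)) →
    (∀ x ∈ pre, ∀ w ∈ gs.map Prod.fst, x < w) →
    (gs.map Prod.fst).map (fun v => ((t.countP (fun x => decide (v ≤ x))) : Int))
      = pvEntries n (pre.length : Int) gs := by
  intro gs
  induction gs with
  | nil => intro pre _ _ _ _; simp [pvEntries]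
  | cons q gs ih =>
    obtain ⟨v, c⟩ := q
    intro pre ht hpos hpw hlt
    rw [List.map_cons, List.pairwise_cons] at hpw
    have hhead : (t.countP (fun x => decide (v ≤ x)) : Int) = n - (pre.length : Int) := by
      have h1 : pre.countP (fun x => decide (v ≤ x)) = 0 := by
        rw [List.countP_eq_zero]
        intro x hx
        have : x < v := hlt x hx v (by simp)
        simp
        omega
      have h2 : (pvExpand ((v, c) :: gs)).countP (fun x => decide (v ≤ x))
          = (pvExpand ((v, c) :: gs)).length := by
        rw [List.countP_eq_length]
        intro x hx
        have hx' := pvMem_expand _ _ hx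
        rw [List.map_cons] at hx'
        rcases List.mem_cons.1 hx' with rfl | hx'
        · simp
        · have : v < x := hpw.1 x hx'
          simp
          omega
      rw [ht, List.countP_append, h1, Nat.zero_add, h2]
      have := congrArg List.length ht
      rw [List.length_append] at this
      omega
    have htail := ih (pre ++ List.replicate c v)
      (by rw [ht, pvExpand, List.append_assoc])
      (fun p hp => hpos p (List.mem_cons_of_mem _ hp)) hpw.2
      (by
        intro x hx w hw
        rcases List.mem_append.1 hx with hx | hx
        · exact hlt x hx w (List.mem_cons_of_mem _ hw)
        · rw [List.eq_of_mem_replicate hx]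
          exact hpw.1 w hw)
    rw [List.length_append, List.length_replicate] at htail
    rw [List.map_cons, List.map_cons, pvEntries, hhead,
      show (pre.length : Int) + ((c : Nat) : Int) = ((pre.length + c : Nat) : Int) by
        push_cast; ring,
      htail]

theorem rope_cutting_eq (arr : List Int) (n : Int) (h : Pre_rope_cutting arr n) :
    rope_cutting arr n = rope_cutting_alt arr n := by
  rcases h with rfl | ⟨hne, hlen⟩
  · simp [rope_cutting, rope_cutting_alt]
  by_cases hn0 : n = 0
  · simp [hn0, rope_cutting, rope_cutting_alt]
  by_cases hneg : n < 0
  · simp only [rope_cutting, rope_cutting_alt, if_neg hn0, if_pos (by omega : n ≤ 0)]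
    rw [PySem.List.pyRange_one_eq_nil (by omega)]
    simp
  -- main case: 0 < n ≤ arr.length
  have hnpos : 0 < n := by omega
  set s : List Int := PySem.List.sorted arr (fun x => x) false with hs
  have hsl : s.length = arr.length := PySem.List.length_sorted ..
  have hsp : s.Pairwise (· ≤ ·) := by
    simpa using PySem.List.sorted_pairwise (xs := arr) (key := fun x => x)
  have hslen : n.toNat ≤ s.length := by
    rw [hsl]; omega
  set t : List Int := s.take n.toNat with htdef
  have htl : t.length = n.toNat := by
    simp [htdef]; omega
  have htne : t ≠ [] := by
    intro h
    rw [h] at htl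
    simp at htl
    omega
  obtain ⟨t0, u, ht⟩ := List.exists_cons_of_ne_nil htne
  have htp0 : t.Pairwise (· ≤ ·) := hsp.sublist (List.take_sublist ..)
  have htp := htp0
  rw [ht, List.pairwise_cons] at htp
  set gs : List (Int × Nat) := pvRunsAux t0 1 u with hgs
  have hexp : pvExpand gs = t := by
    rw [hgs, pvExpand_runsAux, ht]
    simp
  have hposall : ∀ p ∈ gs, 0 < p.2 := pvRunsAux_pos t0 1 u (by omega)
  have hpw : (gs.map Prod.fst).Pairwise (· < ·) :=
    pvPairwise_fst_runsAux t0 1 u htp.2 htp.1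
  obtain ⟨c0, gs', hc0, hgseq⟩ := pvRunsAux_head t0 1 u
  have hc0p : 0 < c0 := hc0
  have hu : u = List.replicate (c0 - 1) t0 ++ pvExpand gs' := by
    have := hexp
    rw [hgs, hgseq, pvExpand, ht] at this
    obtain ⟨c1, rfl⟩ : ∃ c1, c0 = c1 + 1 := ⟨c0 - 1, by omega⟩
    simp only [List.replicate_succ, List.cons_append, List.cons.injEq] at this
    simpa using this.2.symm
  have htexp : t = List.replicate c0 t0 ++ pvExpand gs' := by
    rw [ht, hu]
    obtain ⟨c1, rfl⟩ : ∃ c1, c0 = c1 + 1 := ⟨c0 - 1, by omega⟩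
    simp [List.replicate_succ]
  have hfst : gs.map Prod.fst = t0 :: gs'.map Prod.fst := by
    rw [hgs, hgseq]; simp
  have hpw' : (t0 :: gs'.map Prod.fst).Pairwise (· < ·) := hfst ▸ hpw
  rw [List.pairwise_cons] at hpw'
  -- index-boundary facts
  have hul : (u.length : Int) = n - 1 := by
    have : u.length + 1 = n.toNat := by
      rw [ht] at htl
      simpa using htl
    omega
  have hget : ∀ k : Nat, (hk : k < u.length) →
      PySem.List.pyGetD s ((1 : Int) + (k : Int)) 0 = u[k] := by
    intro k hk
    have hb : k + 1 < s.length := by omega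
    have hb3 : k + 1 < t.length := by omega
    rw [show (1 : Int) + (k : Int) = (((k + 1 : Nat)) : Int) by push_cast; ring,
      PySem.List.pyGetD_natCast, List.getD_eq_getElem s 0 hb]
    have h2 : t[k + 1]'hb3 = s[k + 1]'hb := List.getElem_take ..
    rw [← h2, List.getElem_of_eq ht]
    exact List.getElem_cons_succ ..
  have hcut : PySem.List.pyGetD s 0 0 = t0 := by
    have hb : 0 < s.length := by omega
    have hb3 : 0 < t.length := by omega
    rw [PySem.List.pyGetD_zero, List.getD_eq_getElem s 0 hb]
    have h2 : t[0]'hb3 = s[0]'hb := List.getElem_take ..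
    rw [← h2, List.getElem_of_eq ht]
    simp
  -- evaluate A
  have hA : rope_cutting arr n =
      (if pvEntries n (c0 : Int) gs' = [] then [0] else pvEntries n (c0 : Int) gs') := by
    rw [rope_cutting, if_neg hn0]
    simp only [← hs, hcut]
    rw [pvFoldA s n u n 1 [] t0 (by omega) (by omega) hget]
    have hb2 : pvBnds n t0 1 u = pvEntries n (c0 : Int) gs' := by
      rw [hu, pvBnds_replicate]
      have hch : List.IsChain (· < ·) (t0 :: gs'.map Prod.fst) := by
        rw [← hfst]
        exact hpw.isChain
      rw [show (1 : Int) + ((c0 - 1 : Nat) : Int) = (c0 : Int) by omega]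
      have hpos' : ∀ p ∈ gs', 0 < p.2 := by
        intro p hp
        exact hposall p (by rw [hgs, hgseq]; exact List.mem_cons_of_mem _ hp)
      exact pvBnds_expand n gs' t0 (c0 : Int) hpos' hch
    rw [hb2]
    simp
  -- evaluate B
  have hropes : PySem.List.slice s none (some n) = t := by
    rw [htdef]
    exact PySem.List.slice_to s (by omega)
  have hded : PySem.List.dedup t = t0 :: gs'.map Prod.fst := by
    rw [PySem.List.dedup_eq_ofList, ← hexp, pvOfList_expand gs hposall hpw, hfst]
  have hB : rope_cutting_alt arr n =
      (if pvEntries n (c0 : Int) gs' = [] then [0] else pvEntries n (c0 : Int) gs') := by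
    rw [rope_cutting_alt, if_neg (by omega : ¬ n ≤ 0)]
    simp only [← hs, hropes, hded]
    rw [PySem.List.slice_from _ (by norm_num)]
    simp only [Int.toNat_one, List.drop_one, List.tail_cons]
    rw [List.map_congr_left (fun v _ => pvCountP_eq_firstGe t v htp0)]
    rw [pvMapGe t n (by omega) gs' (List.replicate c0 t0) htexp
      (fun p hp => hposall p (by rw [hgs, hgseq]; exact List.mem_cons_of_mem _ hp))
      hpw'.2
      (by
        intro x hx w hw
        rw [List.eq_of_mem_replicate hx]
        exact hpw'.1 w hw)]
    rw [List.length_replicate]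
  rw [hA, hB]

-- ===== VERDICT (by name: the statement is the Claim_ definition above) =====
theorem rope_cutting_spec : Claim_equal_rope_cutting := by
  intro arr n _ hpre
  exact rope_cutting_eq arr n hpre
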